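-- pv_equiv track=rewrite | github.com/meistro57/Transcripto | transcripto_batch.py | pick_supported_cuda
-- ===== SOURCE A (Python) =====
-- SUPPORTED_CUDA = ["12.8", "12.6", "11.8"]
--
-- def pick_supported_cuda(cuda_version: str) -> str:
--     def as_tuple(v: str) -> tuple[int, int]:
--         major, minor = v.split(".", 1)
--         return int(major), int(minor)
--
--     if not cuda_version:
--         return ""
--     try:
--         target = as_tuple(cuda_version)
--     except Exception:
--         return ""
--
--     supported = []
--     for v in SUPPORTED_CUDA:
--         try:
--             supported.append((as_tuple(v), v))
--         except Exception:
--             continue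
--     supported.sort(reverse=True)
--
--     for (maj_min, v) in supported:
--         if maj_min <= target:
--             return v
--     return ""
-- ===== SOURCE B (Python) =====
-- SUPPORTED_CUDA = ["12.8", "12.6", "11.8"]
--
-- def pick_supported_cuda(cuda_version: str) -> str:
--     def as_tuple(v: str) -> tuple[int, int]:
--         major, minor = v.split(".", 1)
--         return int(major), int(minor)
--
--     if not cuda_version:
--         return ""
--     try:
--         target = as_tuple(cuda_version)
--     except Exception:
--         return ""
--
--     best = None
--     best_v = ""
--     for v in SUPPORTED_CUDA:
--         try:
--             t = as_tuple(v)
--         except Exception: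
--             continue
--         if t <= target and (best is None or best < t):
--             best, best_v = t, v
--     return best_v
-- ===== Notes on version B (the rewrite author's own statement) =====
-- stated objective: simpler
-- what changed: Replaced the build-list / sort-descending / scan-for-first-qualifying pipeline with a single linear max-selection pass that tracks the best supported version <= target.
import Mathlib
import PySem

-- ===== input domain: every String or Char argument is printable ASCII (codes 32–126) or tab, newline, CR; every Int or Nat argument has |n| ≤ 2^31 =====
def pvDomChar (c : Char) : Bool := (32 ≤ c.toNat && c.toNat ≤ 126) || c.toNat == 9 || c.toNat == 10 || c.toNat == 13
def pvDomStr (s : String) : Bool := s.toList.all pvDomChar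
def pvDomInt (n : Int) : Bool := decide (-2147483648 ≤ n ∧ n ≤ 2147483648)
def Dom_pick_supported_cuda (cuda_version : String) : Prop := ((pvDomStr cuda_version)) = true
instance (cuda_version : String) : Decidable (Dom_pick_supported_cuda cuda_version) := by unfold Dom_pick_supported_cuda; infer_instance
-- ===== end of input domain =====

-- B replaces A's build/sort-descending/scan pipeline with one linear max-selection pass (objective: simpler).


-- ===== PORT A =====
def pvSUPPORTED_CUDA : List String := ["12.8", "12.6", "11.8"]

-- as_tuple: v.split(".", 1) must give exactly two pieces (else ValueError), each parsed by int();
-- none = the exception both Pythons catch. Shared by both ports: both sources contain this very inner function.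
def pvAsTuple? (v : String) : Option (Int × Int) :=
  match PySem.Str.splitMax? v "." 1 with
  | some [major, minor] =>
    match PySem.Int.ofStr? major, PySem.Int.ofStr? minor with
    | some a, some b => some (a, b)
    | _, _ => none
  | _ => none

-- Python's (int, int) tuple comparisons, exact (lexicographic)
def pvTupLe (x y : Int × Int) : Bool := x.1 < y.1 || (x.1 == y.1 && x.2 ≤ y.2)
def pvTupLt (x y : Int × Int) : Bool := x.1 < y.1 || (x.1 == y.1 && x.2 < y.2)

-- Python's ((int,int), str) tuple '<', exact: tuple first, then the string (String '<' is code-point lexicographic, exact on ASCII)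
def pvPairLt (x y : (Int × Int) × String) : Bool :=
  pvTupLt x.1 y.1 || (x.1 == y.1 && decide (x.2 < y.2))

-- the final 'for (maj_min, v) in supported: if maj_min <= target: return v' scan of A
def pvScan : List ((Int × Int) × String) → Int × Int → String
  | [], _ => ""
  | (mm, v) :: rest, target => if pvTupLe mm target then v else pvScan rest target

def pick_supported_cuda (cuda_version : String) : String :=
  if cuda_version = "" then ""
  else
    match pvAsTuple? cuda_version with
    | none => ""
    | some target =>
      let supported := pvSUPPORTED_CUDA.foldl
        (fun acc v => match pvAsTuple? v with
          | some t => acc ++ [(t, v)]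
          | none => acc) ([] : List ((Int × Int) × String))
      -- supported.sort(reverse=True): stable insertion sort, larger first (PySem.List.sorted's foldl/insertBy shape,
      -- with Python's nested-tuple '<' written out since the key is a nested tuple)
      let sortedSup := supported.foldl
        (fun acc x => PySem.List.insertBy (fun a b => pvPairLt b a) x acc) []
      pvScan sortedSup target

-- ===== PORT B =====
-- single pass: among parsable supported versions with tuple <= target, keep the max tuple and its string
def pvBestLoop : List String → Int × Int → Option (Int × Int) → String → String
  | [], _, _, best_v => best_v
  | v :: rest, target, best, best_v =>
    match pvAsTuple? v with
    | none => pvBestLoop rest target best best_v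
    | some t =>
      if pvTupLe t target && (match best with | none => true | some b => pvTupLt b t)
      then pvBestLoop rest target (some t) v
      else pvBestLoop rest target best best_v

def pick_supported_cuda_alt (cuda_version : String) : String :=
  if cuda_version = "" then ""
  else
    match pvAsTuple? cuda_version with
    | none => ""
    | some target => pvBestLoop pvSUPPORTED_CUDA target none ""

-- ===== PRECONDITION & SPEC =====
def Spec_pick_supported_cuda (cuda_version : String) (out : String) : Prop := out = pick_supported_cuda_alt cuda_version
instance (cuda_version : String) (out : String) : Decidable (Spec_pick_supported_cuda cuda_version out) := by unfold Spec_pick_supported_cuda; infer_instance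

-- ===== CLAIM (what is proved, stated in full; the proofs are below) =====
def Claim_equal_pick_supported_cuda : Prop := ∀ (cuda_version : String), Dom_pick_supported_cuda cuda_version → Spec_pick_supported_cuda cuda_version (pick_supported_cuda cuda_version)

-- ===== LEMMAS AND PROOFS =====
-- On the fixed SUPPORTED_CUDA list, both sides reduce to concrete functions of the parsed target.
lemma pvAsTuple_128 : pvAsTuple? "12.8" = some (12, 8) := by decide
lemma pvAsTuple_126 : pvAsTuple? "12.6" = some (12, 6) := by decide
lemma pvAsTuple_118 : pvAsTuple? "11.8" = some (11, 8) := by decide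

-- both residual programs are the same function of the parsed target
lemma pv_core (a b : Int) :
    pvScan [(((12:Int),(8:Int)), "12.8"), (((12:Int),(6:Int)), "12.6"), (((11:Int),(8:Int)), "11.8")] (a, b)
    = pvBestLoop pvSUPPORTED_CUDA (a, b) none "" := by
  simp only [pvScan, pvBestLoop, pvSUPPORTED_CUDA, pvAsTuple_128, pvAsTuple_126, pvAsTuple_118,
    pvTupLe, pvTupLt]
  split_ifs <;> simp_all <;> omega

-- ===== VERDICT (by name: the statement is the Claim_ definition above) =====
theorem pick_supported_cuda_spec : Claim_equal_pick_supported_cuda := by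
  intro s _
  unfold Spec_pick_supported_cuda pick_supported_cuda pick_supported_cuda_alt
  by_cases hs : s = ""
  · simp [hs]
  · simp only [hs, if_false]
    cases h : pvAsTuple? s with
    | none => rfl
    | some t =>
      obtain ⟨a, b⟩ := t
      have hA : ((pvSUPPORTED_CUDA.foldl
            (fun acc v => match pvAsTuple? v with | some t => acc ++ [(t, v)] | none => acc)
            ([] : List ((Int × Int) × String))).foldl
          (fun acc x => PySem.List.insertBy (fun a b => pvPairLt b a) x acc) [])
          = [(((12:Int),(8:Int)), "12.8"), (((12:Int),(6:Int)), "12.6"), (((11:Int),(8:Int)), "11.8")] := by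
        decide
      show pvScan _ (a, b) = _
      rw [hA]
      exact pv_core a b
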